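-- pv_equiv track=rewrite | github.com/dbalatoni13/nfsmw | tools/message_class_generator.py | detect_includes_from_fields
-- ===== SOURCE A (Python) =====
-- INCLUDE_ISIMABLE = "Speed/Indep/Src/Interfaces/Simables/ISimable.h"
--
-- INCLUDE_PHY = "Speed/Indep/Src/Physics/PhysicsTypes.h"
--
-- INCLUDE_SIM_COLLISION = "Speed/Indep/Src/Sim/Collision.h"
--
-- INCLUDE_UTYPES = "Speed/Indep/Libs/Support/Utility/UTypes.h"
--
-- INCLUDE_UCRC = "Speed/Indep/Libs/Support/Utility/UCrc.h"
--
-- def detect_includes_from_fields(fields):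
--     includes = set()
--     for f in fields or []:
--         tn = (f.get("TypeName") or "").lower()
--         if "hsimable" in tn:
--             includes.add(INCLUDE_ISIMABLE)
--         if any(k in tn for k in ("physics", "gear", "shift", "enum")):
--             includes.add(INCLUDE_PHY)
--         if "collision_info" in tn:
--             includes.add(INCLUDE_SIM_COLLISION)
--         if "umath::" in tn:
--             includes.add(INCLUDE_UTYPES)
--         if "ucrc32" in tn:
--             includes.add(INCLUDE_UCRC)
--
--     return includes
-- ===== SOURCE B (Python) =====
-- INCLUDE_ISIMABLE = "Speed/Indep/Src/Interfaces/Simables/ISimable.h"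
-- INCLUDE_PHY = "Speed/Indep/Src/Physics/PhysicsTypes.h"
-- INCLUDE_SIM_COLLISION = "Speed/Indep/Src/Sim/Collision.h"
-- INCLUDE_UTYPES = "Speed/Indep/Libs/Support/Utility/UTypes.h"
-- INCLUDE_UCRC = "Speed/Indep/Libs/Support/Utility/UCrc.h"
--
-- RULES = (
--     (INCLUDE_ISIMABLE, ("hsimable",)),
--     (INCLUDE_PHY, ("physics", "gear", "shift", "enum")),
--     (INCLUDE_SIM_COLLISION, ("collision_info",)),
--     (INCLUDE_UTYPES, ("umath::",)),
--     (INCLUDE_UCRC, ("ucrc32",)),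
-- )
--
-- def detect_includes_from_fields(fields):
--     # Worklist of rules still waiting for their first match; a rule is tested only
--     # until it matches once, then it is retired, and the scan stops as soon as the
--     # worklist is empty.
--     found = []
--     pending = list(RULES)
--     for f in fields or []:
--         if not pending:
--             break
--         tn = (f.get("TypeName") or "").lower()
--         matched = [r for r in pending if any(k in tn for k in r[1])]
--         found += [inc for inc, _ in matched]
--         pending = [r for r in pending if r not in matched]
--     return set(found)
-- ===== Notes on version B (the rewrite author's own statement) =====
-- stated objective: alternative
-- what changed: Instead of re-running all five hardcoded if/add checks on every field against a growing result set, B maintains a shrinking worklist of pending (include, keywords) rules: a rule is tested only until its first match, is then retired from the worklist, and the field scan stops early once the worklist is empty, so no duplicate hits are ever produced.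
import Mathlib
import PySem

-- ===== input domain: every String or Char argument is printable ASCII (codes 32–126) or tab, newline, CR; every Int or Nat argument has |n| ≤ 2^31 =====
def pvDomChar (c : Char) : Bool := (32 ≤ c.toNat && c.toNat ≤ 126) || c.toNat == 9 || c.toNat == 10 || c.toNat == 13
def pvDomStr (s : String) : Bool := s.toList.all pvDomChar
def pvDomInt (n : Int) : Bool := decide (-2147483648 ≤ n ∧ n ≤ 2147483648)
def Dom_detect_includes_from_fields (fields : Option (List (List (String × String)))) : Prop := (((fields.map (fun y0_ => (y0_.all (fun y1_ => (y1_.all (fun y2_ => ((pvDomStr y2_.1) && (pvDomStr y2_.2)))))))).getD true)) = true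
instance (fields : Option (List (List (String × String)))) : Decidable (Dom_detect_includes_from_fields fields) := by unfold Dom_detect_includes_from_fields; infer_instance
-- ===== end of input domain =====

-- B replaces A's per-field chain of five if/add checks against a growing set by a shrinking
-- worklist of pending rules: each rule is tested only until its first match, then retired,
-- and the scan stops once the worklist is empty (alternative decomposition, same cost).

def INCLUDE_ISIMABLE : String := "Speed/Indep/Src/Interfaces/Simables/ISimable.h"
def INCLUDE_PHY : String := "Speed/Indep/Src/Physics/PhysicsTypes.h"
def INCLUDE_SIM_COLLISION : String := "Speed/Indep/Src/Sim/Collision.h"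
def INCLUDE_UTYPES : String := "Speed/Indep/Libs/Support/Utility/UTypes.h"
def INCLUDE_UCRC : String := "Speed/Indep/Libs/Support/Utility/UCrc.h"

-- `tn = (f.get("TypeName") or "").lower()` — identical expression in A's and B's loop body
-- (dict = association list, get = first match; `x or ""` on an Optional[str] is `getD ""`:
-- it yields "" both for None and for "")
def tnOf (f : List (String × String)) : String :=
  PySem.Str.lower ((List.lookup "TypeName" f).getD "")

-- ===== PORT A =====
-- the loop body of A: the five if/add branches, in order
def aStep (includes : PySem.Set String) (f : List (String × String)) : PySem.Set String :=
  let tn := tnOf f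
  let includes := if PySem.Str.isIn "hsimable" tn then PySem.Set.add includes INCLUDE_ISIMABLE else includes
  let includes := if ["physics", "gear", "shift", "enum"].any (fun k => PySem.Str.isIn k tn) then PySem.Set.add includes INCLUDE_PHY else includes
  let includes := if PySem.Str.isIn "collision_info" tn then PySem.Set.add includes INCLUDE_SIM_COLLISION else includes
  let includes := if PySem.Str.isIn "umath::" tn then PySem.Set.add includes INCLUDE_UTYPES else includes
  let includes := if PySem.Str.isIn "ucrc32" tn then PySem.Set.add includes INCLUDE_UCRC else includes
  includes

def detect_includes_from_fields (fields : Option (List (List (String × String)))) : List String :=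
  (fields.getD []).foldl aStep PySem.Set.empty

-- ===== PORT B =====
def RULES : List (String × List String) :=
  [(INCLUDE_ISIMABLE, ["hsimable"]),
   (INCLUDE_PHY, ["physics", "gear", "shift", "enum"]),
   (INCLUDE_SIM_COLLISION, ["collision_info"]),
   (INCLUDE_UTYPES, ["umath::"]),
   (INCLUDE_UCRC, ["ucrc32"])]

-- `any(k in tn for k in r[1])`
def ruleMatches (tn : String) (r : String × List String) : Bool :=
  r.2.any (fun k => PySem.Str.isIn k tn)

-- B's for-loop with its `if not pending: break`, as structural recursion on the fields;
-- state = (found, pending), exactly Source B's two locals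
def bLoop (found : List String) (pending : List (String × List String)) :
    List (List (String × String)) → List String × List (String × List String)
  | [] => (found, pending)
  | f :: rest =>
    if pending.isEmpty then (found, pending)
    else
      let tn := tnOf f
      let matched := pending.filter (ruleMatches tn)
      let found' := found ++ matched.map Prod.fst
      let pending' := pending.filter (fun r => !(matched.contains r))
      bLoop found' pending' rest

def detect_includes_from_fields_alt (fields : Option (List (List (String × String)))) : List String :=
  PySem.Set.ofList (bLoop [] RULES (fields.getD [])).1

-- ===== PRECONDITION & SPEC =====
def Spec_detect_includes_from_fields (fields : Option (List (List (String × String)))) (out : List String) : Prop := out = detect_includes_from_fields_alt fields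
instance (fields : Option (List (List (String × String)))) (out : List String) : Decidable (Spec_detect_includes_from_fields fields out) := by unfold Spec_detect_includes_from_fields; infer_instance

-- ===== CLAIM (what is proved, stated in full; the proofs are below) =====
def Claim_equal_detect_includes_from_fields : Prop := ∀ (fields : Option (List (List (String × String)))), Dom_detect_includes_from_fields fields → Spec_detect_includes_from_fields fields (detect_includes_from_fields fields)

-- ===== LEMMAS AND PROOFS =====

-- A's per-field hit list: the includes of the rules matching f, in rule order
def aHits (f : List (String × String)) : List String :=
  ((RULES.filter (ruleMatches (tnOf f))).map Prod.fst)

-- one field: A's chain of conditional adds folds exactly its per-field hit list into the set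
theorem aStep_eq_foldl (s : PySem.Set String) (f : List (String × String)) :
    aStep s f = (aHits f).foldl PySem.Set.add s := by
  simp only [aStep, aHits, ruleMatches, RULES, List.filter_cons, List.filter_nil, List.any_cons,
    List.any_nil, Bool.or_false]
  cases h1 : PySem.Str.isIn "hsimable" (tnOf f) <;>
  cases h2 : (PySem.Str.isIn "physics" (tnOf f) || (PySem.Str.isIn "gear" (tnOf f) ||
      (PySem.Str.isIn "shift" (tnOf f) || PySem.Str.isIn "enum" (tnOf f)))) <;>
  cases h3 : PySem.Str.isIn "collision_info" (tnOf f) <;>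
  cases h4 : PySem.Str.isIn "umath::" (tnOf f) <;>
  cases h5 : PySem.Str.isIn "ucrc32" (tnOf f) <;>
  rfl

theorem a_foldl_eq (l : List (List (String × String))) (s : PySem.Set String) :
    l.foldl aStep s = (l.flatMap aHits).foldl PySem.Set.add s := by
  induction l generalizing s with
  | nil => rfl
  | cons a l ih => simp [List.foldl_cons, List.flatMap_cons, List.foldl_append, ih, aStep_eq_foldl]

-- folding Set.add over a duplicate-free list appends exactly the not-yet-present elements
theorem foldl_add_nodup (l : List String) (s : List String) (h : l.Nodup) :
    l.foldl PySem.Set.add s = s ++ l.filter (fun x => !s.contains x) := by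
  induction l generalizing s with
  | nil => simp
  | cons x l ih =>
    rcases List.nodup_cons.mp h with ⟨hx, hl⟩
    by_cases hmem : x ∈ s
    · rw [List.foldl_cons, PySem.Set.add_of_mem hmem, ih _ hl]
      simp [hmem]
    · rw [List.foldl_cons, PySem.Set.add_of_not_mem hmem, ih _ hl]
      have hf : l.filter (fun y => !((s ++ [x]).contains y)) = l.filter (fun y => !(s.contains y)) := by
        apply List.filter_congr
        intro y hy
        have hyx : y ≠ x := fun h => hx (h ▸ hy)
        simp [hyx]
      rw [hf, List.filter_cons]
      simp [hmem]

-- a sublist of a duplicate-free list picks out exactly its members, in order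
theorem filter_mem_sublist {α : Type} [BEq α] [LawfulBEq α] (l L : List α) (p : α → Bool)
    (hs : l.Sublist L) (hn : L.Nodup) :
    L.filter (fun x => l.contains x && p x) = l.filter p := by
  induction hs with
  | slnil => simp
  | @cons l L a hs ih =>
    rcases List.nodup_cons.mp hn with ⟨ha, hL⟩
    have hal : a ∉ l := fun h => ha (hs.subset h)
    have hfa : (l.contains a && p a) = false := by simp [List.contains_eq_mem, hal]
    rw [List.filter_cons, hfa]
    simpa using ih hL
  | @cons₂ l L a hs ih =>
    rcases List.nodup_cons.mp hn with ⟨ha, hL⟩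
    have hstep : L.filter (fun x => (a :: l).contains x && p x) = l.filter p := by
      rw [← ih hL]
      apply List.filter_congr
      intro x hx
      have hxa : x ≠ a := fun h => ha (h ▸ hx)
      simp [List.contains_eq_mem, hxa]
    rw [List.filter_cons, List.filter_cons, hstep]
    simp [List.contains_eq_mem]

-- folding Set.add over a list of already-present elements is the identity
theorem foldl_add_mem (l : List String) (s : List String) (h : ∀ x ∈ l, x ∈ s) :
    l.foldl PySem.Set.add s = s := by
  induction l with
  | nil => rfl
  | cons x l ih =>
    rw [List.foldl_cons, PySem.Set.add_of_mem (h x (List.mem_cons_self))]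
    exact ih (fun y hy => h y (List.mem_cons_of_mem _ hy))

theorem rules_nodup : RULES.Nodup := by decide

theorem rules_fst_inj : ∀ r ∈ RULES, ∀ s ∈ RULES, r.1 = s.1 → r = s := by decide

-- the main invariant: B's worklist loop computes A's fold over the remaining fields
set_option maxHeartbeats 1000000 in
theorem bLoop_eq (fs : List (List (String × String))) (found : List String)
    (pending : List (String × List String))
    (hsub : pending.Sublist RULES)
    (hcover : ∀ r ∈ RULES, r ∈ pending ∨ r.1 ∈ found)
    (hnew : ∀ r ∈ pending, r.1 ∉ found) :
    (bLoop found pending fs).1 = (fs.flatMap aHits).foldl PySem.Set.add found := by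
  induction fs generalizing found pending with
  | nil => rfl
  | cons f fs ih =>
    cases hp : pending.isEmpty with
    | true =>
      have hpe : pending = [] := List.isEmpty_iff.mp hp
      subst hpe
      have hlhs : (bLoop found [] (f :: fs)).1 = found := rfl
      rw [hlhs]
      refine (foldl_add_mem _ _ ?_).symm
      intro x hxm
      rcases List.mem_flatMap.mp hxm with ⟨g, _, hxg⟩
      rcases List.mem_map.mp ((by simpa [aHits] using hxg) :
        x ∈ (RULES.filter (ruleMatches (tnOf g))).map Prod.fst) with ⟨r, hr, hrx⟩
      have hrR : r ∈ RULES := (List.mem_filter.mp hr).1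
      rcases hcover r hrR with h | h
      · exact absurd h (List.not_mem_nil)
      · exact hrx ▸ h
    | false =>
      have hunf : bLoop found pending (f :: fs) =
          bLoop (found ++ (pending.filter (ruleMatches (tnOf f))).map Prod.fst)
            (pending.filter (fun r => !((pending.filter (ruleMatches (tnOf f))).contains r))) fs := by
        simp [bLoop, hp]
      set tn := tnOf f with htn
      set matched := pending.filter (ruleMatches tn) with hmatched
      set found' := found ++ matched.map Prod.fst with hfound'
      have hpend' : pending.filter (fun r => !(matched.contains r)) =
          pending.filter (fun r => !(ruleMatches tn r)) := by
        apply List.filter_congr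
        intro r hr
        have hc : matched.contains r = ruleMatches tn r := by
          cases hm : ruleMatches tn r with
          | true => simp [hmatched, List.contains_eq_mem, List.mem_filter, hr, hm]
          | false => simp [hmatched, List.contains_eq_mem, List.mem_filter, hm]
        rw [hc]
      set pending' := pending.filter (fun r => !(ruleMatches tn r)) with hpend
      rw [hunf, hpend']
      -- the per-field hit list is duplicate-free
      have hfiltnod : (RULES.filter (ruleMatches tn)).Nodup := rules_nodup.filter _
      have hnodA : (aHits f).Nodup := by
        unfold aHits
        refine List.Nodup.map_on ?_ hfiltnod
        intro r hr s hs hrs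
        exact rules_fst_inj r (List.mem_filter.mp hr).1 s (List.mem_filter.mp hs).1 hrs
      -- key step: folding f's hits into `found` appends exactly the pending matches
      have hkey : (aHits f).foldl PySem.Set.add found = found' := by
        rw [foldl_add_nodup _ _ hnodA, hfound']
        congr 1
        calc ((RULES.filter (ruleMatches tn)).map Prod.fst).filter (fun x => !found.contains x)
            = ((RULES.filter (ruleMatches tn)).filter (fun r => !found.contains r.1)).map Prod.fst := by
              rw [List.filter_map]; rfl
          _ = (RULES.filter (fun r => pending.contains r && ruleMatches tn r)).map Prod.fst := by
              rw [List.filter_filter]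
              congr 1
              apply List.filter_congr
              intro r hr
              have hiff : (!found.contains r.1) = pending.contains r := by
                by_cases hrp : r ∈ pending
                · simp [List.contains_eq_mem, hrp, hnew r hrp]
                · rcases hcover r hr with h | h
                  · exact absurd h hrp
                  · simp [List.contains_eq_mem, hrp, h]
              rw [hiff, Bool.and_comm]
          _ = (pending.filter (ruleMatches tn)).map Prod.fst :=
              congrArg (List.map Prod.fst) (filter_mem_sublist pending RULES (ruleMatches tn) hsub rules_nodup)
      -- new invariants
      have hsub' : pending'.Sublist RULES := List.filter_sublist.trans hsub
      have hcover' : ∀ r ∈ RULES, r ∈ pending' ∨ r.1 ∈ found' := by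
        intro r hr
        rcases hcover r hr with h | h
        · cases hm : ruleMatches tn r with
          | true =>
            right
            exact List.mem_append_right _ (List.mem_map.mpr ⟨r, List.mem_filter.mpr ⟨h, hm⟩, rfl⟩)
          | false =>
            left
            exact List.mem_filter.mpr ⟨h, by simp [hm]⟩
        · exact Or.inr (List.mem_append_left _ h)
      have hnew' : ∀ r ∈ pending', r.1 ∉ found' := by
        intro r hr hmem
        rcases List.mem_filter.mp hr with ⟨hrp, hrm⟩
        rcases List.mem_append.mp hmem with h | h
        · exact hnew r hrp h
        · rcases List.mem_map.mp h with ⟨s, hs, hsr⟩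
          rcases List.mem_filter.mp hs with ⟨hsp, hsm⟩
          have : s = r := rules_fst_inj s (hsub.subset hsp) r (hsub.subset hrp) hsr
          rw [this] at hsm
          simp [hsm] at hrm
      rw [ih found' pending' hsub' hcover' hnew', List.flatMap_cons, List.foldl_append, hkey]

theorem main_eq (fs : List (List (String × String))) :
    (fs.foldl aStep PySem.Set.empty) = PySem.Set.ofList (bLoop [] RULES fs).1 := by
  have h : ((fs.flatMap aHits).foldl PySem.Set.add ([] : List String)).Nodup := by
    rw [← PySem.Set.ofList_eq_foldl]
    exact PySem.Set.nodup_ofList _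
  rw [a_foldl_eq, bLoop_eq fs [] RULES (List.Sublist.refl _) (fun r hr => Or.inl hr) (by simp),
    PySem.Set.ofList_eq_self_of_nodup _ h]
  rfl

-- ===== VERDICT (by name: the statement is the Claim_ definition above) =====
theorem detect_includes_from_fields_spec : Claim_equal_detect_includes_from_fields := by
  intro fields _
  unfold Spec_detect_includes_from_fields detect_includes_from_fields detect_includes_from_fields_alt
  exact main_eq _
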